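-- pv_equiv track=rewrite | github.com/wellecks/nonmonotonic_text | tree_text_gen/binary/common/evaluate.py | get_genorder_tokens
-- ===== SOURCE A (Python) =====
-- def get_genorder_tokens(raw_tokens):
--     # Generation ended when the number of end labels exceeds the number of labels
--     nl = 0
--     ne = 0
--     end = 0
--     for i, t in enumerate(raw_tokens):
--         if t != '<end>':
--             nl += 1
--         else:
--             ne += 1
--         if ne > nl:
--             end = i
--             break
--     genorder = [t for t in raw_tokens[:end] if t != '<end>']
--     return genorder
-- ===== SOURCE B (Python) =====
-- def get_genorder_tokens(raw_tokens):
--     # One fused pass: collect non-end tokens while counting; stop when end labels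
--     # exceed other labels. If generation never terminates, return [] (as A does).
--     nl = 0
--     ne = 0
--     out = []
--     for t in raw_tokens:
--         if t != '<end>':
--             nl += 1
--             out.append(t)
--         else:
--             ne += 1
--             if ne > nl:
--                 return out
--     return []
-- ===== Notes on version B (the rewrite author's own statement) =====
-- stated objective: simpler
-- what changed: B fuses A's two passes (find the break index, then re-scan and filter the prefix) into one traversal that accumulates non-end tokens and returns them the moment end labels outnumber the others.
import Mathlib
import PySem

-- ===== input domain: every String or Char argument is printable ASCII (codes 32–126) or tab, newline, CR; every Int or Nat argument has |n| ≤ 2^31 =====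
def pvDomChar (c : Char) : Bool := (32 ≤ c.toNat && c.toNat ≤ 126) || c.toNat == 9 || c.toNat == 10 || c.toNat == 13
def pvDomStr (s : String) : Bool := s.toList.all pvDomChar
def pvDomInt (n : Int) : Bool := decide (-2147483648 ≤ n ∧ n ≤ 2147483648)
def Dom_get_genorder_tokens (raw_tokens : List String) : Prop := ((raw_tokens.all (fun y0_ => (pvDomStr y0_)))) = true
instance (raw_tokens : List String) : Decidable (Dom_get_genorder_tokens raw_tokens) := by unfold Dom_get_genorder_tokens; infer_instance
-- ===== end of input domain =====

-- B fuses A's two passes (find break index, then filter the prefix) into one accumulating traversal; objective: simpler.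

-- ===== PORT A =====
-- the for-loop with break: returns the final value of `end` (0 if no break)
def pvALoop : List String → Nat → Int → Int → Nat
  | [], _, _, _ => 0
  | t :: rest, i, nl, ne =>
    let nl' := if t ≠ "<end>" then nl + 1 else nl
    let ne' := if t ≠ "<end>" then ne else ne + 1
    if ne' > nl' then i else pvALoop rest (i + 1) nl' ne'

def get_genorder_tokens (raw_tokens : List String) : List String :=
  let e := pvALoop raw_tokens 0 0 0
  (raw_tokens.take e).filter (fun t => t ≠ "<end>")

-- ===== PORT B =====
def pvBLoop : List String → Int → Int → List String → List String
  | [], _, _, _ => []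
  | t :: rest, nl, ne, out =>
    if t ≠ "<end>" then pvBLoop rest (nl + 1) ne (out ++ [t])
    else if ne + 1 > nl then out
    else pvBLoop rest nl (ne + 1) out

def get_genorder_tokens_alt (raw_tokens : List String) : List String :=
  pvBLoop raw_tokens 0 0 []

-- ===== PRECONDITION & SPEC =====
def Spec_get_genorder_tokens (raw_tokens : List String) (out : List String) : Prop := out = get_genorder_tokens_alt raw_tokens
instance (raw_tokens : List String) (out : List String) : Decidable (Spec_get_genorder_tokens raw_tokens out) := by unfold Spec_get_genorder_tokens; infer_instance

-- ===== CLAIM (what is proved, stated in full; the proofs are below) =====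
def Claim_equal_get_genorder_tokens : Prop := ∀ (raw_tokens : List String), Dom_get_genorder_tokens raw_tokens → Spec_get_genorder_tokens raw_tokens (get_genorder_tokens raw_tokens)

-- ===== LEMMAS AND PROOFS =====

lemma pv_main (ts : List String) : ∀ (nl ne : Int) (pre : List String), ne ≤ nl →
    ((pre ++ ts).take (pvALoop ts pre.length nl ne)).filter (fun t => t ≠ "<end>")
      = pvBLoop ts nl ne (pre.filter (fun t => t ≠ "<end>")) := by
  induction ts with
  | nil =>
    intro nl ne pre _
    simp [pvALoop, pvBLoop]
  | cons t rest ih =>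
    intro nl ne pre h
    by_cases ht : t = "<end>"
    · subst ht
      by_cases hb : ne + 1 > nl
      · have hA : pvALoop ("<end>" :: rest) pre.length nl ne = pre.length := by
          simp [pvALoop, hb]
        rw [hA]
        have : (pre ++ "<end>" :: rest).take pre.length = pre := by
          simp
        rw [this]
        simp [pvBLoop, hb]
      · have hA : pvALoop ("<end>" :: rest) pre.length nl ne
            = pvALoop rest (pre.length + 1) nl (ne + 1) := by
          simp [pvALoop, hb]
        rw [hA]
        have h1 : pre ++ "<end>" :: rest = (pre ++ ["<end>"]) ++ rest := by simp
        have h2 : pre.length + 1 = (pre ++ ["<end>"]).length := by simp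
        rw [h1, h2, ih nl (ne + 1) (pre ++ ["<end>"]) (by omega)]
        simp [pvBLoop, hb]
    · have hnb : ¬ (ne > nl + 1) := by omega
      have hA : pvALoop (t :: rest) pre.length nl ne
          = pvALoop rest (pre.length + 1) (nl + 1) ne := by
        simp [pvALoop, ht, hnb]
      rw [hA]
      have h1 : pre ++ t :: rest = (pre ++ [t]) ++ rest := by simp
      have h2 : pre.length + 1 = (pre ++ [t]).length := by simp
      rw [h1, h2, ih (nl + 1) ne (pre ++ [t]) (by omega)]
      simp [pvBLoop, ht]

-- ===== VERDICT (by name: the statement is the Claim_ definition above) =====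
theorem get_genorder_tokens_spec : Claim_equal_get_genorder_tokens := by
  intro raw_tokens _
  unfold Spec_get_genorder_tokens get_genorder_tokens get_genorder_tokens_alt
  have := pv_main raw_tokens 0 0 [] (by norm_num)
  simpa using this
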